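-- pv_equiv track=rewrite | github.com/semacammetu/Hypothesis-driven-experiment-design-with-SEDML-extension | stl_fs_sm-master/stl_fs_sm-master/data_transformation_scripts/create_arff_FG_2.py | eventually
-- ===== SOURCE A (Python) =====
-- def eventually(data, size):
--     result = []
--     number_of_results = len(data) // size
--     for i in range(0, len(data), size):
--         for j in range(i + size, len(data) + 1, size):
--             result.append(max(data[i:j]))
--         if number_of_results * size < len(data):
--             result.append(max(data[i:]))
--     return result
-- ===== SOURCE B (Python) =====
-- def eventually(data, size):
--     # Maintains a running maximum per offset instead of recomputing max(data[i:j])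
--     # for every window end, so each suffix is scanned once.
--     n = len(data)
--     result = []
--     for i in range(0, n, size):
--         m = None
--         j = i
--         while j + size <= n:
--             for x in data[j:j + size]:
--                 if m is None or x > m:
--                     m = x
--             j += size
--             result.append(m)
--         if j < n:
--             for x in data[j:n]:
--                 if m is None or x > m:
--                     m = x
--             result.append(m)
--     return result
-- ===== Notes on version B (the rewrite author's own statement) =====
-- stated objective: faster
-- what changed: B keeps one running maximum per offset and extends it window by window (each suffix element scanned once), instead of recomputing max(data[i:j]) from scratch for every window end as A does.
import Mathlib
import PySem

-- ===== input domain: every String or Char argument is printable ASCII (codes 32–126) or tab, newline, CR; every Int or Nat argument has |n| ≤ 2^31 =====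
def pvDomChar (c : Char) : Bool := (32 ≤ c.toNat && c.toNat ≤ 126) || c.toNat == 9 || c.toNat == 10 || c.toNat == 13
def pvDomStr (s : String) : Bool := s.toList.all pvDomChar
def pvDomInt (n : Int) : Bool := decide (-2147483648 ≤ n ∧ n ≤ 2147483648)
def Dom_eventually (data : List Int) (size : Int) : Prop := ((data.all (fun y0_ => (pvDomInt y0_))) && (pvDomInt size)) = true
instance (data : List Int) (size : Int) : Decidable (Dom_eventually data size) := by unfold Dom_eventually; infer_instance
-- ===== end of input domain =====

-- B maintains one running maximum per offset, extended window by window, instead of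
-- recomputing max(data[i:j]) from scratch for every window end (objective: faster).

-- ===== PORT A =====
-- max(l) for a nonempty list l (every call site in A is on a nonempty slice under Pre_)
def pyMax (l : List Int) : Int := (PySem.List.max? l (fun y => y)).getD 0

def eventually (data : List Int) (size : Int) : List Int :=
  let n : Int := data.length
  let number_of_results : Int := PySem.Int.floordiv n size
  (PySem.List.pyRange 0 n size).foldl (fun result i =>
    let result := (PySem.List.pyRange (i + size) (n + 1) size).foldl
      (fun result j => result ++ [pyMax (PySem.List.slice data (some i) (some j))]) result
    if number_of_results * size < n then
      result ++ [pyMax (PySem.List.slice data (some i) none)]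
    else result) []

-- ===== PORT B =====
-- 'if m is None or x > m: m = x' folded over a chunk of data
def bUpd (m : Option Int) (x : Int) : Option Int :=
  match m with
  | none => some x
  | some v => if x > v then some x else some v

-- the 'while j + size <= n' loop of B; fuel only makes the recursion total
-- (fuel = len(data) always suffices on the calls B makes, where 1 ≤ size)
def bWhile (data : List Int) (n size : Int) :
    Nat → Int → Option Int → List Int → Int × Option Int × List Int
  | 0, j, m, result => (j, m, result)
  | fuel + 1, j, m, result =>
    if j + size ≤ n then
      let m' := (PySem.List.slice data (some j) (some (j + size))).foldl bUpd m
      bWhile data n size fuel (j + size) m' (result ++ [m'.getD 0])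
    else (j, m, result)

def eventually_alt (data : List Int) (size : Int) : List Int :=
  let n : Int := data.length
  (PySem.List.pyRange 0 n size).foldl (fun result i =>
    let r := bWhile data n size data.length i none result
    if r.1 < n then
      let m' := (PySem.List.slice data (some r.1) (some n)).foldl bUpd r.2.1
      r.2.2 ++ [m'.getD 0]
    else r.2.2) []

-- ===== PRECONDITION & SPEC =====
-- size = 0 makes the Python A raise ZeroDivisionError (len(data) // size); excluded.
def Pre_eventually (data : List Int) (size : Int) : Prop := size ≠ 0
instance (data : List Int) (size : Int) : Decidable (Pre_eventually data size) := by
  unfold Pre_eventually; infer_instance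

def pvWitness_eventually : List Int × Int := ([1, 3, 2, 5, 4], 2)

def Spec_eventually (data : List Int) (size : Int) (out : List Int) : Prop := out = eventually_alt data size
instance (data : List Int) (size : Int) (out : List Int) : Decidable (Spec_eventually data size out) := by unfold Spec_eventually; infer_instance

-- ===== CLAIM (what is proved, stated in full; the proofs are below) =====
def Claim_equal_eventually : Prop := ∀ (data : List Int) (size : Int), Dom_eventually data size → Pre_eventually data size → Spec_eventually data size (eventually data size)

-- ===== LEMMAS AND PROOFS =====

theorem max?_append_foldl (l₁ l₂ : List Int) :
    PySem.List.max? (l₁ ++ l₂) (fun y => y) =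
      l₂.foldl bUpd (PySem.List.max? l₁ (fun y => y)) := by
  simp only [PySem.List.max?, List.foldl_append]
  exact PySem.List.foldl_congr_mem l₂ _ bUpd _ (fun acc x _ => by cases acc <;> rfl)

theorem slice_append_slice (data : List Int) {i j k : Int}
    (hi : 0 ≤ i) (hij : i ≤ j) (hjk : j ≤ k) :
    PySem.List.slice data (some i) (some j) ++ PySem.List.slice data (some j) (some k) =
      PySem.List.slice data (some i) (some k) := by
  have hj : 0 ≤ j := le_trans hi hij
  have hk : 0 ≤ k := le_trans hj hjk
  rw [PySem.List.slice_toNat data hi hj, PySem.List.slice_toNat data hj hk,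
      PySem.List.slice_toNat data hi hk]
  have h1 : k.toNat - i.toNat = (j.toNat - i.toNat) + (k.toNat - j.toNat) := by omega
  rw [h1, List.take_add, List.drop_drop]
  have h2 : i.toNat + (j.toNat - i.toNat) = j.toNat := by omega
  rw [h2]

theorem slice_self_nil (data : List Int) (i : Int) (hi : 0 ≤ i) :
    PySem.List.slice data (some i) (some i) = [] := by
  rw [PySem.List.slice_toNat data hi hi]
  simp

theorem slice_nonempty (data : List Int) {i j : Int}
    (hi : 0 ≤ i) (hij : i < j) (hj : j ≤ (data.length : Int)) :
    PySem.List.slice data (some i) (some j) ≠ [] := by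
  have hj : 0 ≤ j := le_trans hi (le_of_lt hij)
  rw [PySem.List.slice_toNat data hi hj]
  have hlen : 0 < (List.take (j.toNat - i.toNat) (List.drop i.toNat data)).length := by
    simp only [List.length_take, List.length_drop]
    omega
  exact List.ne_nil_of_length_pos hlen

theorem pyRange_pos_nil {a b s : Int} (hs : 0 < s) (h : b ≤ a) :
    PySem.List.pyRange a b s = [] := by
  rw [PySem.List.pyRange_of_pos a b hs, if_neg (not_lt.mpr h)]
  simp

theorem pyRange_pos_cons {a b s : Int} (hs : 0 < s) (h : a < b) :
    PySem.List.pyRange a b s = a :: PySem.List.pyRange (a + s) b s := by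
  rw [PySem.List.pyRange_of_pos a b hs, PySem.List.pyRange_of_pos (a + s) b hs, if_pos h]
  by_cases h2 : a + s < b
  · rw [if_pos h2]
    have hc : ((b - a + s - 1) / s).toNat = ((b - (a + s) + s - 1) / s).toNat + 1 := by
      have e : b - a + s - 1 = (b - (a + s) + s - 1) + 1 * s := by ring
      rw [e, Int.add_mul_ediv_right _ _ (by omega : s ≠ 0)]
      have h0 : 0 ≤ (b - (a + s) + s - 1) / s :=
        Int.ediv_nonneg (by omega) (by omega)
      omega
    rw [hc, List.range_succ_eq_map]
    simp only [List.map_cons, List.map_map]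
    congr 1
    · simp
    · exact List.map_congr_left (fun k _ => by simp [Function.comp]; ring)
  · rw [if_neg h2]
    have hc : (b - a + s - 1) / s = 1 := by
      have e : b - a + s - 1 = (b - a - 1) + 1 * s := by ring
      rw [e, Int.add_mul_ediv_right _ _ (by omega : s ≠ 0),
          Int.ediv_eq_zero_of_lt (by omega) (by omega)]
      ring
    rw [hc]
    simp

-- the while-loop invariant: starting from m = max?(data[i:j]), the loop emits the
-- maxima of data[i:t] for every boundary t and ends with m = max?(data[i:jE])
theorem bWhile_spec (data : List Int) {size : Int} (hs : 1 ≤ size) :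
    ∀ (fuel : Nat) (j i : Int) (acc : List Int),
      0 ≤ i → i ≤ j → j ≤ (data.length : Int) →
      (data.length : Int) < j + 1 + (fuel : Int) * size →
      ∃ jE,
        bWhile data (data.length) size fuel j
            (PySem.List.max? (PySem.List.slice data (some i) (some j)) (fun y => y)) acc =
          (jE, PySem.List.max? (PySem.List.slice data (some i) (some jE)) (fun y => y),
            acc ++ (PySem.List.pyRange (j + size) ((data.length : Int) + 1) size).map
              (fun t => pyMax (PySem.List.slice data (some i) (some t)))) ∧
        j ≤ jE ∧ jE ≤ (data.length : Int) ∧ (data.length : Int) < jE + size ∧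
        size ∣ jE - j := by
  intro fuel
  induction fuel with
  | zero =>
    intro j i acc hi hij hjn hfuel
    refine ⟨j, ?_, le_refl j, hjn, by push_cast at hfuel; omega, ⟨0, by ring⟩⟩
    rw [pyRange_pos_nil (by omega) (by push_cast at hfuel; omega)]
    simp [bWhile]
  | succ fuel ih =>
    intro j i acc hi hij hjn hfuel
    by_cases hstep : j + size ≤ (data.length : Int)
    · have hmax : (PySem.List.slice data (some j) (some (j + size))).foldl bUpd
          (PySem.List.max? (PySem.List.slice data (some i) (some j)) (fun y => y)) =
          PySem.List.max? (PySem.List.slice data (some i) (some (j + size))) (fun y => y) := by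
        rw [← max?_append_foldl, slice_append_slice data hi hij (by omega)]
      have hne : PySem.List.slice data (some i) (some (j + size)) ≠ [] :=
        slice_nonempty data hi (by omega) hstep
      have hgetD : (PySem.List.max? (PySem.List.slice data (some i) (some (j + size)))
            (fun y => y)).getD 0 = pyMax (PySem.List.slice data (some i) (some (j + size))) := rfl
      obtain ⟨jE, heq, h1, h2, h3, h4⟩ :=
        ih (j + size) i (acc ++ [pyMax (PySem.List.slice data (some i) (some (j + size)))])
          hi (by omega) hstep (by push_cast at hfuel ⊢; nlinarith)
      refine ⟨jE, ?_, by omega, h2, h3, ?_⟩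
      · rw [bWhile]
        simp only [if_pos hstep, hmax, hgetD]
        rw [pyRange_pos_cons (a := j + size) (b := (data.length : Int) + 1) (by omega)
            (by omega), List.map_cons, heq]
        simp
      · obtain ⟨c, hc⟩ := h4
        exact ⟨c + 1, by rw [mul_add, mul_one, ← hc]; ring⟩
    · refine ⟨j, ?_, le_refl j, hjn, by omega, ⟨0, by ring⟩⟩
      rw [pyRange_pos_nil (by omega) (by omega)]
      rw [bWhile]
      simp [if_neg hstep]

-- the two loop bodies agree on every i the outer loop visits
theorem body_eq (data : List Int) {size : Int} (hs : 1 ≤ size) {i : Int}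
    (hi : i ∈ PySem.List.pyRange 0 (data.length : Int) size) (acc : List Int) :
    (if PySem.Int.floordiv (data.length : Int) size * size < (data.length : Int) then
       ((PySem.List.pyRange (i + size) ((data.length : Int) + 1) size).foldl
         (fun result j => result ++ [pyMax (PySem.List.slice data (some i) (some j))]) acc)
         ++ [pyMax (PySem.List.slice data (some i) none)]
     else
       (PySem.List.pyRange (i + size) ((data.length : Int) + 1) size).foldl
         (fun result j => result ++ [pyMax (PySem.List.slice data (some i) (some j))]) acc) =
    (if (bWhile data (data.length) size data.length i none acc).1 < (data.length : Int) then
       (bWhile data (data.length) size data.length i none acc).2.2 ++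
         [((PySem.List.slice data (some (bWhile data (data.length) size data.length i none acc).1)
             (some (data.length : Int))).foldl bUpd
             (bWhile data (data.length) size data.length i none acc).2.1).getD 0]
     else (bWhile data (data.length) size data.length i none acc).2.2) := by
  obtain ⟨hi0, hin, hdvd⟩ := (PySem.List.mem_pyRange_iff_of_pos (by omega) i).mp hi
  have hn0 : (0 : Int) ≤ (data.length : Int) := Int.natCast_nonneg _
  have hinit : (none : Option Int) =
      PySem.List.max? (PySem.List.slice data (some i) (some i)) (fun y => y) := by
    rw [slice_self_nil data i hi0]; rfl
  have hfuel : (data.length : Int) < i + 1 + (data.length : Int) * size := by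
    have h1 : (data.length : Int) * 1 ≤ (data.length : Int) * size :=
      mul_le_mul_of_nonneg_left hs hn0
    linarith
  obtain ⟨jE, heq, hj1, hj2, hj3, hj4⟩ :=
    bWhile_spec data hs data.length i i acc hi0 le_rfl (le_of_lt hin) hfuel
  rw [← hinit] at heq
  rw [heq, PySem.List.foldl_append_singleton_eq_map]
  have hjEdvd : size ∣ jE := by
    have h1 : size ∣ i := by simpa using hdvd
    have h2 : jE = (jE - i) + i := by ring
    rw [h2]; exact dvd_add hj4 h1
  have hed : size * ((data.length : Int) / size) + (data.length : Int) % size =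
      (data.length : Int) := Int.mul_ediv_add_emod _ _
  have hmod0 : 0 ≤ (data.length : Int) % size := Int.emod_nonneg _ (by omega)
  have hmodlt : (data.length : Int) % size < size := Int.emod_lt_of_pos _ (by omega)
  have hfl : PySem.Int.floordiv (data.length : Int) size = (data.length : Int) / size := by
    have hsz : (0 : Int) ≤ size := by omega
    simp [PySem.Int.floordiv, Int.fdiv_eq_ediv, hsz]
  have hcomm : (data.length : Int) / size * size = size * ((data.length : Int) / size) :=
    mul_comm _ _
  by_cases hlt : jE < (data.length : Int)
  · -- partial window remains: both sides append the maximum of data[i:]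
    have hmodne : (data.length : Int) % size ≠ 0 := by
      intro h0
      have hdl : size ∣ (data.length : Int) := Int.dvd_of_emod_eq_zero h0
      have hdiff : size ∣ (data.length : Int) - jE := dvd_sub hdl hjEdvd
      have := Int.le_of_dvd (by omega) hdiff
      omega
    have hcond : PySem.Int.floordiv (data.length : Int) size * size < (data.length : Int) := by
      rw [hfl, hcomm]; omega
    rw [if_pos hcond, if_pos hlt]
    have hval : (PySem.List.slice data (some jE) (some (data.length : Int))).foldl bUpd
        (PySem.List.max? (PySem.List.slice data (some i) (some jE)) (fun y => y)) =
        PySem.List.max? (PySem.List.slice data (some i) (some (data.length : Int)))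
          (fun y => y) := by
      rw [← max?_append_foldl, slice_append_slice data hi0 hj1 hj2]
    have hfrom : PySem.List.slice data (some i) none =
        PySem.List.slice data (some i) (some (data.length : Int)) := by
      rw [PySem.List.slice_toNat data hi0 hn0,
          List.take_of_length_le (by simp)]
      exact PySem.List.slice_from data hi0
    rw [hfrom, hval]
    rfl
  · -- data splits evenly: no extra append on either side
    have hjEeq : jE = (data.length : Int) := by omega
    have hdl : size ∣ (data.length : Int) := hjEeq ▸ hjEdvd
    have hmod0' : (data.length : Int) % size = 0 := Int.emod_eq_zero_of_dvd hdl
    have hcond : ¬ PySem.Int.floordiv (data.length : Int) size * size <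
        (data.length : Int) := by
      rw [hfl, hcomm]; omega
    rw [if_neg hcond, if_neg hlt]

-- ===== VERDICT (by name: the statement is the Claim_ definition above) =====
theorem eventually_spec : Claim_equal_eventually := by
  intro data size _ hpre
  unfold Pre_eventually at hpre
  unfold Spec_eventually eventually eventually_alt
  rcases lt_trichotomy size 0 with hneg | hz | hpos
  · -- negative step: range(0, len(data), size) is empty in both programs
    have h1 : ¬ size = 0 := by omega
    have h2 : ¬ 0 < size := by omega
    have h3 : ¬ ((data.length : Int) < 0) := by
      have : (0 : Int) ≤ (data.length : Int) := Int.natCast_nonneg _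
      omega
    have hr : PySem.List.pyRange 0 (data.length : Int) size = [] := by
      simp [PySem.List.pyRange, h1, h2, h3]
    simp only [hr, List.foldl_nil]
  · exact absurd hz hpre
  · exact PySem.List.foldl_congr_mem _ _ _ []
      (fun acc x hx => body_eq data (by omega) hx acc)
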